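-- pv_equiv track=rewrite | github.com/VanjaVizi/PythonVezbanje | venv/uvod/uvod.py | funkcijaz13
-- ===== SOURCE A (Python) =====
-- def funkcijaz13(lista):
--     zbirParnih=0
--     proizvodNeparnih=1
--     najmanji = min(lista)
--     najveci=max(lista)
--     razlika= najveci-najmanji
--     for element in lista:
--         if( element%2==0):
--             zbirParnih=zbirParnih+element
--         else:
--             proizvodNeparnih=proizvodNeparnih*element
--
--     return (zbirParnih,proizvodNeparnih,razlika)
-- ===== SOURCE B (Python) =====
-- def funkcijaz13(lista):
--     if not lista:
--         raise ValueError("min() arg is an empty sequence")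
--     najmanji = lista[0]
--     najveci = lista[0]
--     zbirParnih = 0
--     proizvodNeparnih = 1
--     for element in lista:
--         if element < najmanji:
--             najmanji = element
--         if element > najveci:
--             najveci = element
--         if element % 2 == 0:
--             zbirParnih += element
--         else:
--             proizvodNeparnih *= element
--     return (zbirParnih, proizvodNeparnih, najveci - najmanji)
-- ===== Notes on version B (the rewrite author's own statement) =====
-- stated objective: alternative
-- what changed: B makes a single fused pass maintaining min, max, even-sum and odd-product together, instead of A's separate min() and max() scans followed by a parity loop.
import Mathlib
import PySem

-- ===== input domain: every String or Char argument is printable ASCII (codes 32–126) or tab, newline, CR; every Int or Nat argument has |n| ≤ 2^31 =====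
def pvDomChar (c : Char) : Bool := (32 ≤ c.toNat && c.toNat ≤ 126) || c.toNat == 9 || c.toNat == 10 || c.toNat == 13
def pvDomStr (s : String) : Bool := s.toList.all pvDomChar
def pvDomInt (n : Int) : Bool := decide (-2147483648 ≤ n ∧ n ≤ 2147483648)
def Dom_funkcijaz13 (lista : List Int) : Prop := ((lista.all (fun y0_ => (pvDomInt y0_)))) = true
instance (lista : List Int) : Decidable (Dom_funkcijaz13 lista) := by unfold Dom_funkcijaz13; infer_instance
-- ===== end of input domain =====

-- ===== PORT A =====
-- B fuses A's three passes (min, max, parity loop) into one; equivalence proved on nonempty lists.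
def funkcijaz13 (lista : List Int) : Int × Int × Int :=
  let najmanji := (PySem.List.min? lista (fun y => y)).getD 0   -- min(lista); raises on [] (excluded by Pre_)
  let najveci := (PySem.List.max? lista (fun y => y)).getD 0
  let razlika := najveci - najmanji
  let zp := lista.foldl (fun (acc : Int × Int) element =>
      if PySem.Int.mod element 2 == 0 then (acc.1 + element, acc.2)
      else (acc.1, acc.2 * element)) (0, 1)
  (zp.1, zp.2, razlika)

-- ===== PORT B =====
def funkcijaz13_alt (lista : List Int) : Int × Int × Int :=
  match lista with
  | [] => (0, 1, 0)   -- Source B raises ValueError here (excluded by Pre_)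
  | x :: _ =>
    let st := lista.foldl
      (fun (st : Int × Int × Int × Int) element =>
        let mn := if element < st.1 then element else st.1
        let mx := if element > st.2.1 then element else st.2.1
        if PySem.Int.mod element 2 == 0 then (mn, mx, st.2.2.1 + element, st.2.2.2)
        else (mn, mx, st.2.2.1, st.2.2.2 * element))
      (x, x, 0, 1)
    (st.2.2.1, st.2.2.2, st.2.1 - st.1)

-- ===== PRECONDITION & SPEC =====
-- Pre_ excludes only the empty list, on which both A (via min()) and B raise ValueError.
def Pre_funkcijaz13 (lista : List Int) : Prop := lista ≠ []
instance (lista : List Int) : Decidable (Pre_funkcijaz13 lista) := by unfold Pre_funkcijaz13; infer_instance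
def pvWitness_funkcijaz13 : List Int := ([1, 2, 3])
def Spec_funkcijaz13 (lista : List Int) (out : Int × Int × Int) : Prop := out = funkcijaz13_alt lista
instance (lista : List Int) (out : Int × Int × Int) : Decidable (Spec_funkcijaz13 lista out) := by unfold Spec_funkcijaz13; infer_instance

-- ===== CLAIM (what is proved, stated in full; the proofs are below) =====
def Claim_equal_funkcijaz13 : Prop := ∀ (lista : List Int), Dom_funkcijaz13 lista → Pre_funkcijaz13 lista → Spec_funkcijaz13 lista (funkcijaz13 lista)

-- ===== LEMMAS AND PROOFS =====

-- B's fused fold computes the three independent folds componentwise.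
theorem fused_fold (l : List Int) (mn mx z p : Int) :
    l.foldl
      (fun (st : Int × Int × Int × Int) element =>
        let a := if element < st.1 then element else st.1
        let b := if element > st.2.1 then element else st.2.1
        if PySem.Int.mod element 2 == 0 then (a, b, st.2.2.1 + element, st.2.2.2)
        else (a, b, st.2.2.1, st.2.2.2 * element))
      (mn, mx, z, p)
    = (l.foldl min mn, l.foldl max mx,
       l.foldl (fun (acc : Int × Int) element =>
         if PySem.Int.mod element 2 == 0 then (acc.1 + element, acc.2)
         else (acc.1, acc.2 * element)) (z, p)) := by
  induction l generalizing mn mx z p with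
  | nil => simp
  | cons h t ih =>
    have hmn : (if h < mn then h else mn) = min mn h := by omega
    have hmx : (if h > mx then h else mx) = max mx h := by omega
    by_cases hm : PySem.Int.mod h 2 == 0 <;>
      simp only [List.foldl_cons, hm, if_true, if_false, Bool.false_eq_true, hmn, hmx, ih]

-- ===== VERDICT (by name: the statement is the Claim_ definition above) =====
theorem funkcijaz13_spec : Claim_equal_funkcijaz13 := by
  intro lista _ hpre
  unfold Spec_funkcijaz13 funkcijaz13 funkcijaz13_alt
  match lista, hpre with
  | x :: t, _ =>
    simp only [PySem.List.min?_id_cons, PySem.List.max?_id_cons, Option.getD_some, fused_fold]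
    simp
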